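-- pv_equiv track=rewrite | github.com/Nikkuniku/AtcoderProgramming | ABC/ABC100~ABC199/ABC162/f.py | solve
-- ===== SOURCE A (Python) =====
-- def solve(A):
--     N = len(A)
--     M = N // 2
--     INF = 1 << 60
--     dp = [[-INF] * 2 for _ in range(M + 1)]
--     dp[0] = [0, 0]
--     if N % 2 == 0:
--         for i in range(N):
--             k = i // 2
--             if i % 2 == 0:
--                 dp[k + 1][0] = dp[k][0] + A[i]
--             else:
--                 dp[k + 1][1] = max(dp[k][0], dp[k][1]) + A[i]
--         ans = max(dp[M])
--     else:
--         for i in range(N - 1):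
--             k = i // 2
--             if i % 2 == 0:
--                 dp[k + 1][0] = dp[k][0] + A[i]
--             else:
--                 dp[k + 1][1] = max(dp[k]) + A[i]
--         B = A[::-1]
--         ep = [[-INF] * 2 for _ in range(M + 1)]
--         ep[0] = [0, 0]
--         for i in range(N - 1):
--             k = i // 2
--             if i % 2 == 0:
--                 ep[k + 1][0] = ep[k][0] + B[i]
--             else:
--                 ep[k + 1][1] = max(ep[k]) + B[i]
--         ep = ep[::-1]
--         ans = max(max(dp[-1]), max(ep[0]))
--         for j in range(1, N, 2):
--             p = (j - 1) // 2
--             q = (j + 1) // 2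
--             ans = max(ans, dp[p][0] + A[j - 1] + max(ep[q]))
--             ans = max(ans, max(dp[p]) + A[j] + max(ep[q]))
--             ans = max(ans, max(dp[p]) + A[j + 1] + ep[q][0])
--     return ans
-- ===== SOURCE B (Python) =====
-- def solve(A):
--     N = len(A)
--     m = N // 2
--     E = 0
--     for t in range(m):
--         E += A[2 * t]
--     if N % 2 == 0:
--         osuf = 0
--         best = E
--         for t in range(m - 1, -1, -1):
--             E -= A[2 * t]
--             osuf += A[2 * t + 1]
--             best = max(best, E + osuf)
--         return best
--     else:
--         podd = 0
--         for t in range(m):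
--             podd += A[2 * t + 1]
--         Lr = 0
--         H = podd
--         best = E - podd + H
--         for t in range(m - 1, -1, -1):
--             E -= A[2 * t]
--             podd -= A[2 * t + 1]
--             Lr += A[2 * t + 2]
--             H = max(H, podd + Lr)
--             best = max(best, E - podd + H)
--         return best
-- ===== Notes on version B (the rewrite author's own statement) =====
-- stated objective: simpler
-- what changed: Replaces A's three-pass DP (forward table, second table on a reversed copy, odd-N combining loop over three stitched candidates) by closed-form prefix/suffix sums of the even- and odd-indexed elements with a single running maximum in O(1) extra space.
import Mathlib
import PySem

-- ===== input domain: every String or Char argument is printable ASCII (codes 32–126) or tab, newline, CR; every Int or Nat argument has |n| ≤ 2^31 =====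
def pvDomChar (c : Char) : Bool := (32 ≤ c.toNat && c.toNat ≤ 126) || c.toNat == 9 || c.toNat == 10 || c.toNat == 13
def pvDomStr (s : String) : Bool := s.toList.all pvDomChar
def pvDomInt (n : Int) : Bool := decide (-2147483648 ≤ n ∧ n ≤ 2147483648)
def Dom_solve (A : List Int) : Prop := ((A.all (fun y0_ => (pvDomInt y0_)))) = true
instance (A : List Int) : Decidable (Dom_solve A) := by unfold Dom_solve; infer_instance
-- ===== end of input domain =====

-- B replaces A's three-pass DP tables by closed-form prefix/suffix sums with a running maximum (simpler, O(1) extra space).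

-- ===== PORT A =====
-- Shared body of A's two (textually identical) DP loops: iteration i writes row k+1 of the
-- table reading row k (a Python row [x, y] is ported as the pair (x, y); a single-cell write
-- dp[k+1][c] = v keeps the other coordinate).  List indexing A[i] / dp[k] is ported with getD,
-- exact here because every index the Python code uses is in range.
def dpStep (L : List Int) (dp : List (Int × Int)) (i : Nat) : List (Int × Int) :=
  let k := i / 2
  if i % 2 = 0 then
    dp.set (k + 1) ((dp.getD k (0, 0)).1 + L.getD i 0, (dp.getD (k + 1) (0, 0)).2)
  else
    dp.set (k + 1) ((dp.getD (k + 1) (0, 0)).1,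
                    max (dp.getD k (0, 0)).1 (dp.getD k (0, 0)).2 + L.getD i 0)

def solve (A : List Int) : Int :=
  let N := A.length
  let M := N / 2
  let INF : Int := 2 ^ 60
  let dp0 : List (Int × Int) := (List.replicate (M + 1) (-INF, -INF)).set 0 (0, 0)
  if N % 2 = 0 then
    let dp := (List.range N).foldl (dpStep A) dp0
    max (dp.getD M (0, 0)).1 (dp.getD M (0, 0)).2
  else
    let dp := (List.range (N - 1)).foldl (dpStep A) dp0
    let B := A.reverse
    let ep0 : List (Int × Int) := (List.replicate (M + 1) (-INF, -INF)).set 0 (0, 0)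
    let ep := ((List.range (N - 1)).foldl (dpStep B) ep0).reverse
    -- dp[-1] is dp[M] (the table has length M+1)
    let ans := max (max (dp.getD M (0, 0)).1 (dp.getD M (0, 0)).2)
                   (max (ep.getD 0 (0, 0)).1 (ep.getD 0 (0, 0)).2)
    -- for j in range(1, N, 2): enumerated as j = 2*t+1 for t < M — exact since N = 2*M+1 here
    (List.range M).foldl (fun ans t =>
      let j := 2 * t + 1
      let p := (j - 1) / 2
      let q := (j + 1) / 2
      let ans := max ans ((dp.getD p (0, 0)).1 + A.getD (j - 1) 0
                          + max (ep.getD q (0, 0)).1 (ep.getD q (0, 0)).2)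
      let ans := max ans (max (dp.getD p (0, 0)).1 (dp.getD p (0, 0)).2 + A.getD j 0
                          + max (ep.getD q (0, 0)).1 (ep.getD q (0, 0)).2)
      max ans (max (dp.getD p (0, 0)).1 (dp.getD p (0, 0)).2 + A.getD (j + 1) 0
               + (ep.getD q (0, 0)).1)) ans

-- ===== PORT B =====
-- for t in range(m-1, -1, -1) of Source B's even branch: structural recursion, d+1 processes t = d
def loopBEven (A : List Int) : Nat → Int × Int × Int → Int
  | 0, (_, _, best) => best
  | d + 1, (E, osuf, best) =>
    let t := d
    let E' := E - A.getD (2 * t) 0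
    let osuf' := osuf + A.getD (2 * t + 1) 0
    loopBEven A d (E', osuf', max best (E' + osuf'))

-- for t in range(m-1, -1, -1) of Source B's odd branch
def loopBOdd (A : List Int) : Nat → Int × Int × Int × Int × Int → Int
  | 0, (_, _, _, _, best) => best
  | d + 1, (E, podd, Lr, H, best) =>
    let t := d
    let E' := E - A.getD (2 * t) 0
    let podd' := podd - A.getD (2 * t + 1) 0
    let Lr' := Lr + A.getD (2 * t + 2) 0
    let H' := max H (podd' + Lr')
    loopBOdd A d (E', podd', Lr', H', max best (E' - podd' + H'))

def solve_alt (A : List Int) : Int :=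
  let N := A.length
  let m := N / 2
  let E := (List.range m).foldl (fun s t => s + A.getD (2 * t) 0) 0
  if N % 2 = 0 then
    loopBEven A m (E, 0, E)
  else
    let podd := (List.range m).foldl (fun s t => s + A.getD (2 * t + 1) 0) 0
    loopBOdd A m (E, podd, 0, podd, E - podd + podd)

-- ===== PRECONDITION & SPEC =====
def Spec_solve (A : List Int) (out : Int) : Prop := out = solve_alt A
instance (A : List Int) (out : Int) : Decidable (Spec_solve A out) := by unfold Spec_solve; infer_instance

-- ===== CLAIM (what is proved, stated in full; the proofs are below) =====
def Claim_equal_solve : Prop := ∀ (A : List Int), Dom_solve A → Spec_solve A (solve A)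

-- ===== LEMMAS AND PROOFS =====

-- element access (0 outside range; every access below is in range)
def af (L : List Int) (i : Nat) : Int := L.getD i 0

-- prefix sums of even-indexed / odd-indexed elements, and A's second DP row
def Ef (L : List Int) : Nat → Int
  | 0 => 0
  | t + 1 => Ef L t + af L (2 * t)

def Pf (L : List Int) : Nat → Int
  | 0 => 0
  | t + 1 => Pf L t + af L (2 * t + 1)

def Df (L : List Int) : Nat → Int
  | 0 => 0
  | t + 1 => max (Ef L t) (Df L t) + af L (2 * t + 1)

def Qf (L : List Int) (k : Nat) : Int := max (Ef L k) (Df L k)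

-- sup characterisation of Qf
theorem Q_ge (L : List Int) (k t : Nat) (h : t ≤ k) :
    Ef L t + (Pf L k - Pf L t) ≤ Qf L k := by
  induction k with
  | zero => interval_cases t; simp [Qf, Ef, Pf, Df]
  | succ k ih =>
    rcases Nat.lt_or_ge t (k+1) with ht | ht
    · have := ih (by omega)
      unfold Qf at *
      have hD : Df L (k+1) = max (Ef L k) (Df L k) + af L (2*k+1) := rfl
      have hP : Pf L (k+1) = Pf L k + af L (2*k+1) := rfl
      omega
    · have : t = k + 1 := by omega
      subst this
      unfold Qf
      omega

theorem Q_le (L : List Int) (k : Nat) (c : Int)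
    (h : ∀ t ≤ k, Ef L t + (Pf L k - Pf L t) ≤ c) : Qf L k ≤ c := by
  induction k generalizing c with
  | zero => have := h 0 (by omega); simpa [Qf, Ef, Pf, Df] using this
  | succ k ih =>
    have h1 : Ef L (k+1) ≤ c := by have := h (k+1) le_rfl; omega
    have h2 : Qf L k ≤ c - af L (2*k+1) := by
      apply ih
      intro t ht
      have := h t (by omega)
      have hP : Pf L (k+1) = Pf L k + af L (2*k+1) := rfl
      omega
    unfold Qf at *
    have hD : Df L (k+1) = max (Ef L k) (Df L k) + af L (2*k+1) := rfl
    omega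

-- getD over set
theorem getD_set_pair (l : List (Int × Int)) (i t : Nat) (x d : Int × Int) :
    (l.set i x).getD t d = if i = t ∧ i < l.length then x else l.getD t d := by
  simp [List.getD_eq_getElem?_getD, List.getElem?_set]
  split_ifs with h1 h2 h3 <;> simp_all <;> omega

theorem foldl_dpStep_length (L : List Int) (l : List Nat) (dp : List (Int × Int)) :
    (l.foldl (dpStep L) dp).length = dp.length := by
  induction l generalizing dp with
  | nil => rfl
  | cons i l ih =>
    simp only [List.foldl_cons, ih]
    unfold dpStep
    split <;> simp

-- the DP-table loop of A, after 2*k iterations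
theorem dpFold (L : List Int) (s : Nat) (k : Nat) :  k ≤ s → ∀ t, t ≤ s →
    ((List.range (2 * k)).foldl (dpStep L)
        ((List.replicate (s + 1) (-(2 ^ 60 : Int), -(2 ^ 60 : Int))).set 0 (0, 0))).getD t (0, 0)
      = if t ≤ k then (Ef L t, Df L t) else (-(2 ^ 60 : Int), -(2 ^ 60 : Int)) := by
  induction k with
  | zero =>
    intro _ t ht
    simp only [Nat.mul_zero, List.range_zero, List.foldl_nil]
    rw [getD_set_pair]
    simp only [List.length_replicate]
    rcases Nat.eq_zero_or_pos t with h0 | h0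
    · subst h0
      simp [Ef, Df]
    · rw [if_neg (by omega), if_neg (by omega), List.getD_eq_getElem?_getD,
         List.getElem?_replicate, if_pos (by omega)]
      rfl
  | succ k ih =>
    intro hk t ht
    have hks : k ≤ s := by omega
    have h2 : 2 * (k + 1) = (2 * k + 1) + 1 := by ring
    rw [h2, List.range_succ, List.foldl_append, List.range_succ, List.foldl_append]
    simp only [List.foldl_cons, List.foldl_nil]
    have hlen : ((List.range (2 * k)).foldl (dpStep L)
        ((List.replicate (s + 1) (-(2 ^ 60 : Int), -(2 ^ 60 : Int))).set 0 (0, 0))).length = s + 1 := by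
      rw [foldl_dpStep_length]; simp
    set old := (List.range (2 * k)).foldl (dpStep L)
        ((List.replicate (s + 1) (-(2 ^ 60 : Int), -(2 ^ 60 : Int))).set 0 (0, 0)) with hold
    have hgk : old.getD k (0, 0) = (Ef L k, Df L k) := by
      rw [ih hks k hks, if_pos le_rfl]
    have hgk1 : old.getD (k + 1) (0, 0) = (-(2 ^ 60 : Int), -(2 ^ 60 : Int)) := by
      rw [ih hks (k + 1) (by omega), if_neg (by omega)]
    have hmod : (2 * k) % 2 = 0 := by omega
    have hdiv : 2 * k / 2 = k := by omega
    have hmod1 : (2 * k + 1) % 2 = 1 := by omega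
    have hdiv1 : (2 * k + 1) / 2 = k := by omega
    have e1 : dpStep L old (2 * k) = old.set (k + 1) (Ef L (k + 1), -(2 ^ 60 : Int)) := by
      unfold dpStep
      rw [hmod, hdiv, if_pos rfl, hgk, hgk1]
      rfl
    rw [e1]
    have hmidk : (old.set (k + 1) (Ef L (k + 1), -(2 ^ 60 : Int))).getD k (0, 0) = (Ef L k, Df L k) := by
      rw [getD_set_pair, if_neg (by omega), hgk]
    have hmidk1 : (old.set (k + 1) (Ef L (k + 1), -(2 ^ 60 : Int))).getD (k + 1) (0, 0)
        = (Ef L (k + 1), -(2 ^ 60 : Int)) := by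
      rw [getD_set_pair, if_pos (by omega)]
    have e2 : dpStep L (old.set (k + 1) (Ef L (k + 1), -(2 ^ 60 : Int))) (2 * k + 1)
        = (old.set (k + 1) (Ef L (k + 1), -(2 ^ 60 : Int))).set (k + 1) (Ef L (k + 1), Df L (k + 1)) := by
      unfold dpStep
      rw [hmod1, hdiv1, if_neg (by omega), hmidk, hmidk1]
      rfl
    rw [e2, getD_set_pair, getD_set_pair]
    simp only [List.length_set, hlen]
    rcases Nat.lt_trichotomy t (k + 1) with h' | h' | h'
    · rw [if_neg (by omega), if_neg (by omega), ih hks t (by omega),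
         if_pos (by omega), if_pos (by omega)]
    · subst h'
      rw [if_pos (by omega), if_pos (by omega)]
    · rw [if_neg (by omega), if_neg (by omega), ih hks t (by omega), if_neg (by omega), if_neg (by omega)]

-- initial sums of Source B
theorem sumE (A : List Int) (m : Nat) :
    (List.range m).foldl (fun s t => s + A.getD (2 * t) 0) 0 = Ef A m := by
  induction m with
  | zero => rfl
  | succ m ih => rw [List.range_succ, List.foldl_append, ih]; rfl

theorem sumP (A : List Int) (m : Nat) :
    (List.range m).foldl (fun s t => s + A.getD (2 * t + 1) 0) 0 = Pf A m := by
  induction m with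
  | zero => rfl
  | succ m ih => rw [List.range_succ, List.foldl_append, ih]; rfl

-- EVEN case: the value of Source B's backward loop, as a recursion on the number e of processed levels
def BbE (A : List Int) (m : Nat) : Nat → Int
  | 0 => Ef A m
  | e + 1 => max (BbE A m e) (Ef A (m - e - 1) + (Pf A m - Pf A (m - e - 1)))

theorem loopBEven_run (A : List Int) (m : Nat) : ∀ d, d ≤ m →
    loopBEven A d (Ef A d, Pf A m - Pf A d, BbE A m (m - d)) = BbE A m m := by
  intro d
  induction d with
  | zero =>
    intro _
    simp [loopBEven]
  | succ d ih =>
    intro hd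
    have hE : Ef A (d + 1) - A.getD (2 * d) 0 = Ef A d := by
      simp [Ef, af]
    have hP : Pf A m - Pf A (d + 1) + A.getD (2 * d + 1) 0 = Pf A m - Pf A d := by
      have : Pf A (d + 1) = Pf A d + af A (2 * d + 1) := by simp [Pf]
      unfold af at this
      omega
    have hB : max (BbE A m (m - (d + 1))) (Ef A d + (Pf A m - Pf A d)) = BbE A m (m - d) := by
      have h1 : m - d = (m - (d + 1)) + 1 := by omega
      rw [h1]
      have h2 : BbE A m ((m - (d + 1)) + 1)
          = max (BbE A m (m - (d + 1)))
                (Ef A (m - (m - (d + 1)) - 1) + (Pf A m - Pf A (m - (m - (d + 1)) - 1))) := by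
        simp [BbE]
      have h3 : m - (m - (d + 1)) - 1 = d := by omega
      rw [h3] at h2
      omega
    show loopBEven A d (Ef A (d + 1) - A.getD (2 * d) 0,
        Pf A m - Pf A (d + 1) + A.getD (2 * d + 1) 0,
        max (BbE A m (m - (d + 1)))
          (Ef A (d + 1) - A.getD (2 * d) 0 + (Pf A m - Pf A (d + 1) + A.getD (2 * d + 1) 0)))
        = BbE A m m
    rw [hE, hP, hB]
    exact ih (by omega)

theorem BbE_ge (A : List Int) (m e t : Nat) (hm : e ≤ m) (h1 : m - e ≤ t) (h2 : t ≤ m) :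
    Ef A t + (Pf A m - Pf A t) ≤ BbE A m e := by
  induction e with
  | zero =>
    have : t = m := by omega
    subst this
    simp [BbE]
  | succ e ih =>
    rcases Nat.lt_or_ge t (m - e) with ht | ht
    · have : t = m - e - 1 := by omega
      subst this
      unfold BbE
      omega
    · have := ih (by omega) ht
      unfold BbE
      omega

theorem BbE_le (A : List Int) (m e : Nat) (c : Int) (hm : e ≤ m)
    (h : ∀ t, m - e ≤ t → t ≤ m → Ef A t + (Pf A m - Pf A t) ≤ c) : BbE A m e ≤ c := by
  induction e with
  | zero => have := h m (by omega) le_rfl; unfold BbE; omega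
  | succ e ih =>
    have h1 : BbE A m e ≤ c := ih (by omega) (fun t ht1 ht2 => h t (by omega) ht2)
    have h2 := h (m - e - 1) (by omega) (by omega)
    unfold BbE
    omega

-- ODD case: values of Source B's backward loop (Hh e = running H, Bb e = running best, after e levels)
def Hh (A R : List Int) (m : Nat) : Nat → Int
  | 0 => Pf A m
  | e + 1 => max (Hh A R m e) (Pf A (m - e - 1) + Ef R (e + 1))

def Bb (A R : List Int) (m : Nat) : Nat → Int
  | 0 => Ef A m - Pf A m + Pf A m
  | e + 1 => max (Bb A R m e) (Ef A (m - e - 1) - Pf A (m - e - 1) + Hh A R m (e + 1))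

theorem loopBOdd_run (A R : List Int) (m : Nat)
    (hrev : ∀ t, t < m → Ef R (m - t) = Ef R (m - t - 1) + A.getD (2 * t + 2) 0) : ∀ d, d ≤ m →
    loopBOdd A d (Ef A d, Pf A d, Ef R (m - d), Hh A R m (m - d), Bb A R m (m - d))
      = Bb A R m m := by
  intro d
  induction d with
  | zero =>
    intro _
    simp [loopBOdd]
  | succ d ih =>
    intro hd
    have hE : Ef A (d + 1) - A.getD (2 * d) 0 = Ef A d := by
      simp [Ef, af]
    have hP : Pf A (d + 1) - A.getD (2 * d + 1) 0 = Pf A d := by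
      simp [Pf, af]
    have hL : Ef R (m - (d + 1)) + A.getD (2 * d + 2) 0 = Ef R (m - d) := by
      have h1 := hrev d (by omega)
      have h2 : m - d - 1 = m - (d + 1) := by omega
      rw [h2] at h1
      omega
    have hH : max (Hh A R m (m - (d + 1))) (Pf A d + Ef R (m - d)) = Hh A R m (m - d) := by
      have h1 : m - d = (m - (d + 1)) + 1 := by omega
      rw [h1]
      have h2 : Hh A R m ((m - (d + 1)) + 1)
          = max (Hh A R m (m - (d + 1)))
                (Pf A (m - (m - (d + 1)) - 1) + Ef R ((m - (d + 1)) + 1)) := by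
        simp [Hh]
      have h3 : m - (m - (d + 1)) - 1 = d := by omega
      rw [h3] at h2
      omega
    have hB : max (Bb A R m (m - (d + 1))) (Ef A d - Pf A d + Hh A R m (m - d)) = Bb A R m (m - d) := by
      have h1 : m - d = (m - (d + 1)) + 1 := by omega
      rw [h1]
      have h2 : Bb A R m ((m - (d + 1)) + 1)
          = max (Bb A R m (m - (d + 1)))
                (Ef A (m - (m - (d + 1)) - 1) - Pf A (m - (m - (d + 1)) - 1)
                 + Hh A R m ((m - (d + 1)) + 1)) := by
        simp [Bb]
      have h3 : m - (m - (d + 1)) - 1 = d := by omega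
      rw [h3] at h2
      omega
    show loopBOdd A d (Ef A (d + 1) - A.getD (2 * d) 0,
        Pf A (d + 1) - A.getD (2 * d + 1) 0,
        Ef R (m - (d + 1)) + A.getD (2 * d + 2) 0,
        max (Hh A R m (m - (d + 1)))
          (Pf A (d + 1) - A.getD (2 * d + 1) 0 + (Ef R (m - (d + 1)) + A.getD (2 * d + 2) 0)),
        max (Bb A R m (m - (d + 1)))
          (Ef A (d + 1) - A.getD (2 * d) 0 - (Pf A (d + 1) - A.getD (2 * d + 1) 0)
           + max (Hh A R m (m - (d + 1)))
               (Pf A (d + 1) - A.getD (2 * d + 1) 0 + (Ef R (m - (d + 1)) + A.getD (2 * d + 2) 0))))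
        = Bb A R m m
    rw [hE, hP, hL, hH, hB]
    exact ih (by omega)

theorem Hh_ge (A R : List Int) (m e s : Nat) (hm : e ≤ m) (h1 : m - e ≤ s) (h2 : s ≤ m) :
    Pf A s + Ef R (m - s) ≤ Hh A R m e := by
  induction e with
  | zero =>
    have : s = m := by omega
    subst this
    simp [Hh, Ef]
  | succ e ih =>
    rcases Nat.lt_or_ge s (m - e) with hs | hs
    · have hse : s = m - e - 1 := by omega
      have hme : m - s = e + 1 := by omega
      rw [hse] at *
      rw [hme]
      unfold Hh
      omega
    · have := ih (by omega) hs
      unfold Hh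
      omega

theorem Hh_le (A R : List Int) (m e : Nat) (c : Int) (hm : e ≤ m)
    (h : ∀ s, m - e ≤ s → s ≤ m → Pf A s + Ef R (m - s) ≤ c) : Hh A R m e ≤ c := by
  induction e with
  | zero =>
    have := h m (by omega) le_rfl
    simp [Ef] at this
    unfold Hh
    omega
  | succ e ih =>
    have h1 : Hh A R m e ≤ c := ih (by omega) (fun s hs1 hs2 => h s (by omega) hs2)
    have h2 := h (m - e - 1) (by omega) (by omega)
    have hme : m - (m - e - 1) = e + 1 := by omega
    rw [hme] at h2
    unfold Hh
    omega

theorem Bb_ge (A R : List Int) (m e t : Nat) (hm : e ≤ m) (h1 : m - e ≤ t) (h2 : t ≤ m) :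
    Ef A t - Pf A t + Hh A R m (m - t) ≤ Bb A R m e := by
  induction e with
  | zero =>
    have : t = m := by omega
    subst this
    simp [Bb, Hh]
  | succ e ih =>
    rcases Nat.lt_or_ge t (m - e) with ht | ht
    · have hte : t = m - e - 1 := by omega
      have hmt : m - t = e + 1 := by omega
      rw [hte] at *
      rw [hmt]
      unfold Bb
      omega
    · have := ih (by omega) ht
      unfold Bb
      omega

theorem Bb_le (A R : List Int) (m e : Nat) (c : Int) (hm : e ≤ m)
    (h : ∀ t, m - e ≤ t → t ≤ m → Ef A t - Pf A t + Hh A R m (m - t) ≤ c) :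
    Bb A R m e ≤ c := by
  induction e with
  | zero =>
    have := h m (by omega) le_rfl
    rw [Nat.sub_self] at this
    unfold Hh at this
    unfold Bb
    omega
  | succ e ih =>
    have h1 : Bb A R m e ≤ c := ih (by omega) (fun t ht1 ht2 => h t (by omega) ht2)
    have h2 := h (m - e - 1) (by omega) (by omega)
    have hme : m - (m - e - 1) = e + 1 := by omega
    rw [hme] at h2
    unfold Bb
    omega

-- reversal translations (N = 2*m+1)
theorem af_reverse (A : List Int) (m : Nat) (hN : A.length = 2 * m + 1) (i : Nat) (hi : i ≤ 2 * m) :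
    af A.reverse i = af A (2 * m - i) := by
  unfold af
  rw [List.getD_eq_getElem?_getD, List.getD_eq_getElem?_getD,
      List.getElem?_reverse (by omega)]
  congr 2
  omega

theorem Pf_reverse (A : List Int) (m : Nat) (hN : A.length = 2 * m + 1) (s : Nat) :
    s ≤ m → Pf A.reverse s = Pf A m - Pf A (m - s) := by
  induction s with
  | zero => intro _; simp [Pf]
  | succ s ih =>
    intro hs
    have h1 : Pf A.reverse (s + 1) = Pf A.reverse s + af A.reverse (2 * s + 1) := by
      simp [Pf]
    have h2 := af_reverse A m hN (2 * s + 1) (by omega)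
    have hidx : 2 * m - (2 * s + 1) = 2 * (m - (s + 1)) + 1 := by omega
    rw [hidx] at h2
    have h3 : Pf A (m - s) = Pf A (m - (s + 1)) + af A (2 * (m - (s + 1)) + 1) := by
      have h4 : m - s = (m - (s + 1)) + 1 := by omega
      rw [h4]
      simp [Pf]
    have h5 := ih (by omega)
    omega

theorem Ef_reverse_succ (A : List Int) (m : Nat) (hN : A.length = 2 * m + 1) (t : Nat) (ht : t < m) :
    Ef A.reverse (m - t) = Ef A.reverse (m - t - 1) + af A (2 * t + 2) := by
  have h4 : Ef A.reverse (m - t) = Ef A.reverse ((m - t - 1) + 1) := by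
    congr 1
    omega
  have h1 : Ef A.reverse ((m - t - 1) + 1) = Ef A.reverse (m - t - 1) + af A.reverse (2 * (m - t - 1)) := by
    simp [Ef]
  have h2 := af_reverse A m hN (2 * (m - t - 1)) (by omega)
  have hidx : 2 * m - 2 * (m - t - 1) = 2 * t + 2 := by omega
  rw [hidx] at h2
  omega

-- generic lemmas about the combining fold of A's odd branch
theorem foldC_le (f g h : Nat → Int) (m : Nat) (a0 c : Int) (h0 : a0 ≤ c)
    (hf : ∀ t < m, f t ≤ c) (hg : ∀ t < m, g t ≤ c) (hh : ∀ t < m, h t ≤ c) :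
    (List.range m).foldl (fun ans t => max (max (max ans (f t)) (g t)) (h t)) a0 ≤ c := by
  induction m generalizing a0 with
  | zero => simpa using h0
  | succ m ih =>
    rw [List.range_succ, List.foldl_append]
    simp only [List.foldl_cons, List.foldl_nil]
    have h1 := ih a0 h0 (fun t ht => hf t (by omega)) (fun t ht => hg t (by omega))
      (fun t ht => hh t (by omega))
    have h2 := hf m (by omega)
    have h3 := hg m (by omega)
    have h4 := hh m (by omega)
    omega

theorem foldC_ge_init (f g h : Nat → Int) (m : Nat) (a0 : Int) :
    a0 ≤ (List.range m).foldl (fun ans t => max (max (max ans (f t)) (g t)) (h t)) a0 := by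
  induction m generalizing a0 with
  | zero => simp
  | succ m ih =>
    rw [List.range_succ, List.foldl_append]
    simp only [List.foldl_cons, List.foldl_nil]
    have := ih a0
    omega

theorem foldC_ge_h (f g h : Nat → Int) (m : Nat) (a0 : Int) (t : Nat) (ht : t < m) :
    h t ≤ (List.range m).foldl (fun ans t => max (max (max ans (f t)) (g t)) (h t)) a0 := by
  induction m generalizing a0 with
  | zero => omega
  | succ m ih =>
    rw [List.range_succ, List.foldl_append]
    simp only [List.foldl_cons, List.foldl_nil]
    rcases Nat.lt_or_ge t m with h' | h'
    · have := ih a0 h'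
      omega
    · have hde : t = m := by omega
      subst hde
      have := foldC_ge_init f g h t a0
      omega

-- getD through reverse
theorem getD_reverse_pair (l : List (Int × Int)) (q : Nat) (hq : q < l.length) (d : Int × Int) :
    (l.reverse.getD q d) = l.getD (l.length - 1 - q) d := by
  rw [List.getD_eq_getElem?_getD, List.getD_eq_getElem?_getD, List.getElem?_reverse hq]

-- the two branch results
theorem even_case (A : List Int) (M : Nat) (hN : A.length = 2 * M) :
    solve A = solve_alt A := by
  have hM2 : A.length % 2 = 0 := by omega
  have hMdiv : A.length / 2 = M := by omega
  have hA : solve A = max (Ef A M) (Df A M) := by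
    simp only [solve, hMdiv, hM2]
    rw [if_pos trivial, hN, dpFold A M M le_rfl M le_rfl, if_pos le_rfl]
  have hB : solve_alt A = BbE A M M := by
    simp only [solve_alt, hMdiv, hM2]
    rw [if_pos trivial, sumE]
    have hrun := loopBEven_run A M M le_rfl
    rw [Nat.sub_self] at hrun
    have e1 : Pf A M - Pf A M = 0 := by omega
    rw [e1] at hrun
    have e2 : BbE A M 0 = Ef A M := by simp [BbE]
    rw [e2] at hrun
    exact hrun
  rw [hA, hB]
  have le1 : Qf A M ≤ BbE A M M :=
    Q_le A M _ (fun t ht => BbE_ge A M M t le_rfl (by omega) ht)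
  have le2 : BbE A M M ≤ Qf A M :=
    BbE_le A M M _ le_rfl (fun t _ ht => Q_ge A M t ht)
  unfold Qf at le1 le2
  omega

theorem odd_case (A : List Int) (m : Nat) (hN : A.length = 2 * m + 1) :
    solve A = solve_alt A := by
  have hM2 : A.length % 2 = 1 := by omega
  have hMdiv : A.length / 2 = m := by omega
  have hN1 : A.length - 1 = 2 * m := by omega
  -- B's side value
  have hB : solve_alt A = Bb A A.reverse m m := by
    simp only [solve_alt, hMdiv, hM2]
    rw [if_neg one_ne_zero, sumE, sumP]
    have hrev : ∀ t, t < m → Ef A.reverse (m - t) = Ef A.reverse (m - t - 1) + A.getD (2 * t + 2) 0 :=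
      fun t ht => Ef_reverse_succ A m hN t ht
    have hrun := loopBOdd_run A A.reverse m hrev m le_rfl
    rw [Nat.sub_self] at hrun
    have e0 : Ef A.reverse 0 = 0 := by simp [Ef]
    have e1 : Hh A A.reverse m 0 = Pf A m := by simp [Hh]
    have e2 : Bb A A.reverse m 0 = Ef A m - Pf A m + Pf A m := by simp [Bb]
    rw [e0, e1, e2] at hrun
    exact hrun
  rw [hB]
  -- A's side: unfold to the combining fold
  simp only [solve, hMdiv, hM2]
  rw [if_neg one_ne_zero, hN1]
  set dp := (List.range (2 * m)).foldl (dpStep A)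
      ((List.replicate (m + 1) (-(2 ^ 60 : Int), -(2 ^ 60 : Int))).set 0 (0, 0)) with hdp
  set epf := (List.range (2 * m)).foldl (dpStep A.reverse)
      ((List.replicate (m + 1) (-(2 ^ 60 : Int), -(2 ^ 60 : Int))).set 0 (0, 0)) with hepf
  have heplen : epf.length = m + 1 := by
    rw [hepf, foldl_dpStep_length]; simp
  have hdpg : ∀ t, t ≤ m → dp.getD t (0, 0) = (Ef A t, Df A t) := by
    intro t ht
    rw [hdp, dpFold A m m le_rfl t ht, if_pos ht]
  have hepg : ∀ q, q ≤ m → epf.reverse.getD q (0, 0) = (Ef A.reverse (m - q), Df A.reverse (m - q)) := by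
    intro q hq
    rw [getD_reverse_pair epf q (by omega) (0, 0), heplen]
    have hidx : m + 1 - 1 - q = m - q := by omega
    rw [hidx, hepf, dpFold A.reverse m m le_rfl (m - q) (by omega), if_pos (by omega)]
  -- the triangle bound: every stitched selection value is ≤ B's result
  have e0r : Ef A.reverse 0 = 0 := by simp [Ef]
  have pair_le_Bb : ∀ t1 t2, t1 ≤ t2 → t2 ≤ m →
      Ef A t1 + (Pf A t2 - Pf A t1) + Ef A.reverse (m - t2) ≤ Bb A A.reverse m m := by
    intro t1 t2 h12 h2m
    have h1 := Hh_ge A A.reverse m (m - t1) t2 (by omega) (by omega) h2m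
    have h2 := Bb_ge A A.reverse m m t1 le_rfl (by omega) (h12.trans h2m)
    omega
  -- rewrite the table reads inside the combining fold into Ef/Df values
  rw [hdpg m le_rfl, hepg 0 (by omega)]
  refine Eq.trans (PySem.List.foldl_congr_mem _ _ (fun ans t =>
      max (max (max ans
        (Ef A t + A.getD (2 * t) 0
          + max (Ef A.reverse (m - (t + 1))) (Df A.reverse (m - (t + 1)))))
        (max (Ef A t) (Df A t) + A.getD (2 * t + 1) 0
          + max (Ef A.reverse (m - (t + 1))) (Df A.reverse (m - (t + 1)))))
        (max (Ef A t) (Df A t) + A.getD (2 * t + 2) 0 + Ef A.reverse (m - (t + 1)))) _ ?_) ?_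
  · intro acc t htm
    rw [List.mem_range] at htm
    have i1 : (2 * t + 1 - 1) / 2 = t := by omega
    have i2 : 2 * t + 1 - 1 = 2 * t := by omega
    have i3 : (2 * t + 1 + 1) / 2 = t + 1 := by omega
    have i4 : 2 * t + 1 + 1 = 2 * t + 2 := by omega
    rw [i1, i2, i3, i4, hdpg t (by omega), hepg (t + 1) (by omega)]
  · show List.foldl (fun ans t =>
        max (max (max ans
          (Ef A t + A.getD (2 * t) 0
            + max (Ef A.reverse (m - (t + 1))) (Df A.reverse (m - (t + 1)))))
          (max (Ef A t) (Df A t) + A.getD (2 * t + 1) 0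
            + max (Ef A.reverse (m - (t + 1))) (Df A.reverse (m - (t + 1)))))
          (max (Ef A t) (Df A t) + A.getD (2 * t + 2) 0 + Ef A.reverse (m - (t + 1))))
        (max (max (Ef A m) (Df A m)) (max (Ef A.reverse (m - 0)) (Df A.reverse (m - 0))))
        (List.range m) = Bb A A.reverse m m
    rw [Nat.sub_zero]
    set F := List.foldl (fun ans t =>
        max (max (max ans
          (Ef A t + A.getD (2 * t) 0
            + max (Ef A.reverse (m - (t + 1))) (Df A.reverse (m - (t + 1)))))
          (max (Ef A t) (Df A t) + A.getD (2 * t + 1) 0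
            + max (Ef A.reverse (m - (t + 1))) (Df A.reverse (m - (t + 1)))))
          (max (Ef A t) (Df A t) + A.getD (2 * t + 2) 0 + Ef A.reverse (m - (t + 1))))
        (max (max (Ef A m) (Df A m)) (max (Ef A.reverse m) (Df A.reverse m)))
        (List.range m) with hF
    have hinit : max (max (Ef A m) (Df A m)) (max (Ef A.reverse m) (Df A.reverse m)) ≤ F := by
      rw [hF]; exact foldC_ge_init _ _ _ _ _
    have hthird : ∀ t, t < m →
        max (Ef A t) (Df A t) + A.getD (2 * t + 2) 0 + Ef A.reverse (m - (t + 1)) ≤ F := by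
      intro t ht
      rw [hF]
      exact foldC_ge_h _ _ _ m _ t ht
    have pair_le_F : ∀ t1 t2, t1 ≤ t2 → t2 ≤ m →
        Ef A t1 + (Pf A t2 - Pf A t1) + Ef A.reverse (m - t2) ≤ F := by
      intro t1 t2 h12 h2m
      rcases Nat.lt_or_ge t2 m with hlt | hge
      · have hq := Q_ge A t2 t1 h12
        have hrs := Ef_reverse_succ A m hN t2 hlt
        have hc : m - t2 - 1 = m - (t2 + 1) := by omega
        rw [hc] at hrs
        have h3 := hthird t2 hlt
        unfold Qf at hq
        unfold af at hrs
        omega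
      · have ht2m : t2 = m := by omega
        have hq := Q_ge A t2 t1 h12
        have hzz : Ef A.reverse (m - t2) = 0 := by rw [ht2m, Nat.sub_self]; exact e0r
        have hPm : Pf A t2 = Pf A m := by rw [ht2m]
        have hEm : Ef A t2 = Ef A m := by rw [ht2m]
        have hDm : Df A t2 = Df A m := by rw [ht2m]
        unfold Qf at hq
        omega
    have hBbleF : Bb A A.reverse m m ≤ F := by
      refine Bb_le A A.reverse m m F le_rfl (fun t1 _ ht1 => ?_)
      have hH := Hh_le A A.reverse m (m - t1) (F - Ef A t1 + Pf A t1) (by omega)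
        (fun s hs1 hs2 => by
          have := pair_le_F t1 s (by omega) hs2
          omega)
      omega
    have hFleBb : F ≤ Bb A A.reverse m m := by
      rw [hF]
      apply foldC_le
      · have hq1 := Q_le A m (Bb A A.reverse m m) (fun t ht => by
          have hpr := pair_le_Bb t m ht le_rfl
          rw [Nat.sub_self] at hpr
          omega)
        have hq2 := Q_le A.reverse m (Bb A A.reverse m m) (fun s hs => by
          have hp1 := Pf_reverse A m hN s hs
          have hp2 := Pf_reverse A m hN m le_rfl
          rw [Nat.sub_self] at hp2
          have h00 : Ef A 0 = 0 := by simp [Ef]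
          have h01 : Pf A 0 = 0 := by simp [Pf]
          have hEc : Ef A.reverse (m - (m - s)) = Ef A.reverse s := by congr 1; omega
          have hpair := pair_le_Bb 0 (m - s) (by omega) (by omega)
          rw [hEc] at hpair
          omega)
        unfold Qf at hq1 hq2
        omega
      · intro t ht
        have hEt1 : Ef A (t + 1) = Ef A t + A.getD (2 * t) 0 := by simp [Ef, af]
        have key := Q_le A.reverse (m - (t + 1)) (Bb A A.reverse m m - Ef A (t + 1))
          (fun s hs => by
            have hp1 := Pf_reverse A m hN s (by omega)
            have hp2 := Pf_reverse A m hN (m - (t + 1)) (by omega)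
            have hc2 : Pf A (m - (m - (t + 1))) = Pf A (t + 1) := by congr 1; omega
            rw [hc2] at hp2
            have hEc : Ef A.reverse (m - (m - s)) = Ef A.reverse s := by congr 1; omega
            have hpair := pair_le_Bb (t + 1) (m - s) (by omega) (by omega)
            rw [hEc] at hpair
            omega)
        unfold Qf at key
        omega
      · intro t ht
        have hPt1 : Pf A (t + 1) = Pf A t + A.getD (2 * t + 1) 0 := by simp [Pf, af]
        have key := Q_le A t (Bb A A.reverse m m - A.getD (2 * t + 1) 0
            - max (Ef A.reverse (m - (t + 1))) (Df A.reverse (m - (t + 1)))) (fun t1 ht1 => by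
          have key2 := Q_le A.reverse (m - (t + 1))
              (Bb A A.reverse m m - (Ef A t1 + (Pf A t - Pf A t1)) - A.getD (2 * t + 1) 0)
            (fun s hs => by
              have hp1 := Pf_reverse A m hN s (by omega)
              have hp2 := Pf_reverse A m hN (m - (t + 1)) (by omega)
              have hc2 : Pf A (m - (m - (t + 1))) = Pf A (t + 1) := by congr 1; omega
              rw [hc2] at hp2
              have hEc : Ef A.reverse (m - (m - s)) = Ef A.reverse s := by congr 1; omega
              have hpair := pair_le_Bb t1 (m - s) (by omega) (by omega)
              rw [hEc] at hpair
              omega)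
          unfold Qf at key2
          omega)
        unfold Qf at key
        omega
      · intro t ht
        have key := Q_le A t (Bb A A.reverse m m - A.getD (2 * t + 2) 0
            - Ef A.reverse (m - (t + 1))) (fun t1 ht1 => by
          have hrs := Ef_reverse_succ A m hN t ht
          have hc : m - t - 1 = m - (t + 1) := by omega
          rw [hc] at hrs
          have hpair := pair_le_Bb t1 t ht1 (by omega)
          unfold af at hrs
          omega)
        unfold Qf at key
        omega
    omega

-- ===== VERDICT (by name: the statement is the Claim_ definition above) =====
theorem solve_spec : Claim_equal_solve := by
  intro A _
  unfold Spec_solve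
  rcases Nat.even_or_odd A.length with ⟨M, hM⟩ | ⟨m, hm⟩
  · exact even_case A M (by omega)
  · exact odd_case A m (by omega)
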